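-- pv_equiv track=rewrite | github.com/westzyan/fightWFP | download_from_relay/download_website_defense_open_world.py | fill_all_resource
-- ===== SOURCE A (Python) =====
-- start_white_list = ["android-app:", "ios-app", "https://accounts.google.com/ServiceLogin?", "https:&#x2F;",
--                     "//creativecommons", "https://chrome.google.com/webstore", "'+m[0].params.src+'", "'+r"]
--
-- end_white_list = ["/", ".com", ".mp4", ".mp3", ".net", ".org", ".cn", ".us", "p=iframe-alerts", ".ms", "/en-us"]
--
-- def fill_url(host, part_url):
--     """
--     补全URL
--     :param part_url:
--     :param host:
--     :return:
--     """
--     if not part_url.startswith("http"):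
--         if part_url.startswith("//"):
--             full_url = "https:" + part_url
--         elif part_url.startswith("./"):
--             full_url = "https:" + part_url[1:]
--         elif not part_url.startswith("/"):
--             full_url = host + "/" + part_url
--         else:
--             full_url = host + part_url
--     else:
--         full_url = part_url
--     return full_url
--
-- def fill_all_resource(host, resource_list):
--     # 过滤开头
--     tmp_set = set()
--     # 保存能在目录服务器中查找到的URL
--     origin_set = set()
--     # 获取到原始读取数据
--     for SR in resource_list:
--         if SR == "":
--             tmp_set.add("")
--             continue
--         for start_item in start_white_list:
--             if SR.startswith(start_item):
--                 tmp_set.add(SR)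
--                 break
--         for end_item in end_white_list:
--             if SR.endswith(end_item):
--                 tmp_set.add(SR)
--                 break
--     # 对origin_set里面元素进行填充，得到完整的URL，存到origin_full_set
--     true_set = resource_list.difference(tmp_set)
--     for item in true_set:
--         full_resource_url = fill_url(host, item)
--         origin_set.add(full_resource_url)
--     return origin_set
-- ===== SOURCE B (Python) =====
-- start_white_list = ["android-app:", "ios-app", "https://accounts.google.com/ServiceLogin?", "https:&#x2F;",
--                     "//creativecommons", "https://chrome.google.com/webstore", "'+m[0].params.src+'", "'+r"]
--
-- end_white_list = ["/", ".com", ".mp4", ".mp3", ".net", ".org", ".cn", ".us", "p=iframe-alerts", ".ms", "/en-us"]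
--
-- def fill_url(host, part_url):
--     if not part_url.startswith("http"):
--         if part_url.startswith("//"):
--             full_url = "https:" + part_url
--         elif part_url.startswith("./"):
--             full_url = "https:" + part_url[1:]
--         elif not part_url.startswith("/"):
--             full_url = host + "/" + part_url
--         else:
--             full_url = host + part_url
--     else:
--         full_url = part_url
--     return full_url
--
-- def _trie_build(words):
--     # character trie; a node is {'$': True?} plus child dicts keyed by char
--     root = {}
--     for w in words:
--         node = root
--         for ch in w:
--             node = node.setdefault(ch, {})
--         node['$'] = True
--     return root
--
-- def _trie_matches_prefix(root, s):
--     # True iff some word stored in the trie is a prefix of s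
--     node = root
--     if '$' in node:
--         return True
--     for ch in s:
--         if ch not in node:
--             return False
--         node = node[ch]
--         if '$' in node:
--             return True
--     return False
--
-- _START_TRIE = _trie_build(start_white_list)
-- _END_TRIE = _trie_build(w[::-1] for w in end_white_list)
--
-- def fill_all_resource(host, resource_list):
--     # walk each resource through the two tries instead of scanning the whitelists
--     origin_set = set()
--     for SR in resource_list:
--         if SR == "":
--             continue
--         if _trie_matches_prefix(_START_TRIE, SR):
--             continue
--         if _trie_matches_prefix(_END_TRIE, SR[::-1]):
--             continue
--         origin_set.add(fill_url(host, SR))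
--     return origin_set
-- ===== Notes on version B (the rewrite author's own statement) =====
-- stated objective: alternative
-- what changed: B precompiles the two whitelists into character tries (one for prefixes, one built from reversed suffixes) and classifies each resource by a single trie walk, replacing A's exclusion-set construction with nested whitelist scans and the resource_list.difference step.
import Mathlib
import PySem

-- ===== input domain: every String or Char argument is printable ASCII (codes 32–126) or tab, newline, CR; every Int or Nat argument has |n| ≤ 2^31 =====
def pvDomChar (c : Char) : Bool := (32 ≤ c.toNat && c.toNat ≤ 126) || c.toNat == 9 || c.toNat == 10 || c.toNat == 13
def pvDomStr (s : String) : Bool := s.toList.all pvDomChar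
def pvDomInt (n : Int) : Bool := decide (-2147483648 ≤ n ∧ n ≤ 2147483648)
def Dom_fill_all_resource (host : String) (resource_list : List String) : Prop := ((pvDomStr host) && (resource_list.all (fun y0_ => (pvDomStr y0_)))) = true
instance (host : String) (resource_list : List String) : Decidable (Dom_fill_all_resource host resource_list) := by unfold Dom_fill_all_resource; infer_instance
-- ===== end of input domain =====

-- B precompiles the whitelists into character tries and classifies each resource by a trie walk,
-- replacing A's exclusion-set + set-difference scheme (alternative data structure, same result).
-- resource_list is a Python set: the list holds its distinct elements; outputs are sets (compared as sets).

-- ===== PORT A =====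
def start_white_list : List String := ["android-app:", "ios-app", "https://accounts.google.com/ServiceLogin?", "https:&#x2F;", "//creativecommons", "https://chrome.google.com/webstore", "'+m[0].params.src+'", "'+r"]

def end_white_list : List String := ["/", ".com", ".mp4", ".mp3", ".net", ".org", ".cn", ".us", "p=iframe-alerts", ".ms", "/en-us"]

def fill_url (host : String) (part_url : String) : String :=
  if !(PySem.Str.startswith part_url "http") then
    if PySem.Str.startswith part_url "//" then "https:" ++ part_url
    else if PySem.Str.startswith part_url "./" then "https:" ++ PySem.Str.slice part_url (some 1) none
    else if !(PySem.Str.startswith part_url "/") then host ++ "/" ++ part_url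
    else host ++ part_url
  else part_url

def fill_all_resource (host : String) (resource_list : List String) : List String :=
  let tmp_set : PySem.Set String := resource_list.foldl (fun tmp SR =>
    if SR == "" then PySem.Set.add tmp ""
    else
      -- 'for start_item in …: if SR.startswith(start_item): tmp_set.add(SR); break' = add once iff any prefix matches
      let tmp1 := if start_white_list.any (fun it => PySem.Str.startswith SR it) then PySem.Set.add tmp SR else tmp
      if end_white_list.any (fun it => PySem.Str.endswith SR it) then PySem.Set.add tmp1 SR else tmp1)
    PySem.Set.empty
  let true_set := PySem.Set.diff resource_list tmp_set
  true_set.foldl (fun origin item => PySem.Set.add origin (fill_url host item)) PySem.Set.empty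

-- ===== PORT B =====
-- trie node: terminal flag ('$' in the Python dict) + children (mutual pair, no nested inductive)
mutual
inductive PTrie where
  | mk : Bool → PChildren → PTrie
inductive PChildren where
  | nil : PChildren
  | cons : Char → PTrie → PChildren → PChildren
end

def ptrieEmpty : PTrie := PTrie.mk false PChildren.nil

def childGet : PChildren → Char → Option PTrie
  | PChildren.nil, _ => none
  | PChildren.cons k t rest, c => if k == c then some t else childGet rest c

-- node.setdefault-style write: replace the first binding of c, else append
def childSet : PChildren → Char → PTrie → PChildren
  | PChildren.nil, c, t => PChildren.cons c t PChildren.nil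
  | PChildren.cons k t0 rest, c, t =>
      if k == c then PChildren.cons k t rest else PChildren.cons k t0 (childSet rest c t)

-- the inner 'for ch in w: node = node.setdefault(ch, {})' walk of _trie_build, then node['$'] = True
def insertW : List Char → PTrie → PTrie
  | [], PTrie.mk _ ch => PTrie.mk true ch
  | c :: cs, PTrie.mk term ch =>
      PTrie.mk term (childSet ch c (insertW cs ((childGet ch c).getD ptrieEmpty)))

def ptrieBuild (ws : List String) : PTrie :=
  ws.foldl (fun t w => insertW w.toList t) ptrieEmpty

-- _trie_matches_prefix: '$'-check, then walk the characters
def hasPref : List Char → PTrie → Bool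
  | s, PTrie.mk term ch =>
      term || (match s with
        | [] => false
        | c :: cs =>
          match childGet ch c with
          | none => false
          | some t' => hasPref cs t')

def pvStartTrie : PTrie := ptrieBuild start_white_list

-- w[::-1] ported as toList.reverse: exact by PySem.Str.slice?_none_none_neg_one
def pvEndTrie : PTrie := ptrieBuild (end_white_list.map (fun w => String.ofList w.toList.reverse))

def fill_all_resource_alt (host : String) (resource_list : List String) : List String :=
  resource_list.foldl (fun origin SR =>
    if SR == "" then origin
    else if hasPref SR.toList pvStartTrie then origin
    else if hasPref SR.toList.reverse pvEndTrie then origin   -- SR[::-1], exact by slice?_none_none_neg_one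
    else PySem.Set.add origin (fill_url host SR)) PySem.Set.empty

-- ===== PRECONDITION & SPEC =====
def Spec_fill_all_resource (host : String) (resource_list : List String) (out : List String) : Prop := out = fill_all_resource_alt host resource_list
instance (host : String) (resource_list : List String) (out : List String) : Decidable (Spec_fill_all_resource host resource_list out) := by unfold Spec_fill_all_resource; infer_instance

-- ===== CLAIM (what is proved, stated in full; the proofs are below) =====
def Claim_equal_fill_all_resource : Prop := ∀ (host : String) (resource_list : List String), Dom_fill_all_resource host resource_list → Spec_fill_all_resource host resource_list (fill_all_resource host resource_list)

-- ===== LEMMAS AND PROOFS =====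

-- ---- trie semantics ----
theorem childGet_childSet : ∀ (ch : PChildren) (c d : Char) (t : PTrie),
    childGet (childSet ch c t) d = if c = d then some t else childGet ch d
  | PChildren.nil, c, d, t => by
      simp only [childSet, childGet]
      by_cases h : c = d <;> simp [h]
  | PChildren.cons k t0 rest, c, d, t => by
      by_cases hkc : k = c
      · subst hkc
        simp only [childSet, beq_self_eq_true, if_true, childGet]
        by_cases hkd : k = d <;> simp [hkd]
      · simp only [childSet, beq_iff_eq, hkc, if_false, childGet,
          childGet_childSet rest c d t]
        by_cases hkd : k = d <;> by_cases hcd : c = d <;> simp_all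

theorem hasPref_empty (s : List Char) : hasPref s ptrieEmpty = false := by
  cases s <;> simp [hasPref, ptrieEmpty, childGet]

theorem hasPref_insertW (w : List Char) (t : PTrie) (s : List Char) :
    hasPref s (insertW w t) = (hasPref s t || decide (w <+: s)) := by
  induction w generalizing t s with
  | nil =>
      cases t with
      | mk term ch => cases s <;> simp [insertW, hasPref]
  | cons c cs ih =>
      cases t with
      | mk term ch =>
        cases s with
        | nil => simp [insertW, hasPref]
        | cons d ds =>
            simp only [insertW, hasPref, childGet_childSet]
            by_cases hcd : c = d
            · subst hcd
              rw [if_pos rfl]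
              cases hg : childGet ch c with
              | none =>
                  simp only [Option.getD_none]
                  rw [ih]
                  simp [hasPref_empty, List.cons_prefix_cons]
              | some t' =>
                  simp only [Option.getD_some]
                  rw [ih]
                  simp [Bool.or_assoc, List.cons_prefix_cons]
            · rw [if_neg hcd]
              have : ¬ (c :: cs <+: d :: ds) := by
                intro h
                exact hcd (List.cons_prefix_cons.mp h).1
              simp [this]

theorem hasPref_foldl (ws : List String) (t : PTrie) (s : List Char) :
    hasPref s (ws.foldl (fun t w => insertW w.toList t) t)
      = (hasPref s t || ws.any (fun w => decide (w.toList <+: s))) := by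
  induction ws generalizing t with
  | nil => simp
  | cons w rest ih =>
      simp only [List.foldl_cons, ih, hasPref_insertW, List.any_cons, Bool.or_assoc]

theorem hasPref_build (ws : List String) (s : List Char) :
    hasPref s (ptrieBuild ws) = ws.any (fun w => decide (w.toList <+: s)) := by
  unfold ptrieBuild
  rw [hasPref_foldl, hasPref_empty, Bool.false_or]

theorem startswith_decide (s p : String) :
    PySem.Str.startswith s p = decide (p.toList <+: s.toList) := by
  rw [Bool.eq_iff_iff]
  simp [PySem.Chars.startswith_iff]

theorem endswith_decide (s p : String) :
    PySem.Str.endswith s p = decide (p.toList <:+ s.toList) := by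
  rw [Bool.eq_iff_iff]
  simp [PySem.Chars.endswith_iff]

theorem startTrie_eq (SR : String) :
    hasPref SR.toList pvStartTrie = start_white_list.any (fun it => PySem.Str.startswith SR it) := by
  rw [pvStartTrie, hasPref_build]
  simp only [startswith_decide]

theorem endTrie_eq (SR : String) :
    hasPref SR.toList.reverse pvEndTrie = end_white_list.any (fun it => PySem.Str.endswith SR it) := by
  rw [pvEndTrie, hasPref_build, List.any_map]
  simp only [endswith_decide]
  congr 1
  funext w
  simp [List.reverse_prefix]

-- ---- A's result as a filter (as in the obvious reading of A) ----
def bad_resource (SR : String) : Bool :=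
  SR == "" || start_white_list.any (fun p => PySem.Str.startswith SR p) || end_white_list.any (fun s => PySem.Str.endswith SR s)

-- the body of A's tmp_set loop, named for the lemmas (definitionally the lambda inside fill_all_resource)
def tmpStep (tmp : List String) (SR : String) : List String :=
  if SR == "" then PySem.Set.add tmp ""
  else
    let tmp1 := if start_white_list.any (fun it => PySem.Str.startswith SR it) then PySem.Set.add tmp SR else tmp
    if end_white_list.any (fun it => PySem.Str.endswith SR it) then PySem.Set.add tmp1 SR else tmp1

theorem tmp_step_mem (tmp : List String) (SR x : String) :
    x ∈ tmpStep tmp SR ↔ x ∈ tmp ∨ (bad_resource SR = true ∧ x = SR) := by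
  unfold tmpStep bad_resource
  by_cases h0 : SR = ""
  · subst h0
    simp [PySem.Set.mem_add]
  · have h0' : (SR == "") = false := by simp [h0]
    rw [h0']
    cases hs : start_white_list.any (fun it => PySem.Str.startswith SR it) <;>
      cases he : end_white_list.any (fun it => PySem.Str.endswith SR it) <;>
        simp [PySem.Set.mem_add]

theorem tmp_foldl_mem (l : List String) (tmp : List String) (x : String) :
    x ∈ l.foldl tmpStep tmp ↔ x ∈ tmp ∨ (x ∈ l ∧ bad_resource x = true) := by
  induction l generalizing tmp with
  | nil => simp
  | cons SR rest ih =>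
      rw [List.foldl_cons, ih, tmp_step_mem]
      constructor
      · rintro (⟨hx | ⟨hb, rfl⟩⟩ | ⟨hx, hb⟩)
        · exact Or.inl hx
        · exact Or.inr ⟨List.mem_cons_self, hb⟩
        · exact Or.inr ⟨List.mem_cons_of_mem _ hx, hb⟩
      · rintro (hx | ⟨hmem, hb⟩)
        · exact Or.inl (Or.inl hx)
        · rcases List.mem_cons.1 hmem with rfl | hx
          · exact Or.inl (Or.inr ⟨hb, rfl⟩)
          · exact Or.inr ⟨hx, hb⟩

theorem fill_all_resource_eq (host : String) (l : List String) :
    fill_all_resource host l = fill_all_resource_alt host l := by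
  show (PySem.Set.diff l (l.foldl tmpStep PySem.Set.empty)).foldl
      (fun origin item => PySem.Set.add origin (fill_url host item)) PySem.Set.empty
    = l.foldl (fun origin SR =>
        if SR == "" then origin
        else if hasPref SR.toList pvStartTrie then origin
        else if hasPref SR.toList.reverse pvEndTrie then origin
        else PySem.Set.add origin (fill_url host SR)) PySem.Set.empty
  have hfilter : PySem.Set.diff l (l.foldl tmpStep PySem.Set.empty) = l.filter (fun x => !bad_resource x) := by
    unfold PySem.Set.diff
    apply List.filter_congr
    intro x hx
    have h1 : x ∈ l.foldl tmpStep PySem.Set.empty ↔ bad_resource x = true := by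
      rw [tmp_foldl_mem]
      simp [PySem.Set.empty, hx]
    have h2 : (l.foldl tmpStep PySem.Set.empty).contains x = bad_resource x := by
      rw [Bool.eq_iff_iff]
      simpa using h1
    exact congrArg Bool.not h2
  rw [hfilter, List.foldl_filter]
  congr 1
  funext origin SR
  rw [startTrie_eq, endTrie_eq]
  unfold bad_resource
  by_cases h0 : SR = ""
  · simp [h0]
  · have h0' : (SR == "") = false := by simp [h0]
    rw [h0']
    cases hs : start_white_list.any (fun it => PySem.Str.startswith SR it) <;>
      cases he : end_white_list.any (fun it => PySem.Str.endswith SR it) <;> simp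

-- ===== VERDICT (by name: the statement is the Claim_ definition above) =====
theorem fill_all_resource_spec : Claim_equal_fill_all_resource := by
  intro host l _
  exact fill_all_resource_eq host l
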